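-- pv_equiv track=rewrite | github.com/pbarton666/naacp | utilities.py | make_OD_array
-- ===== SOURCE A (Python) =====
-- def make_OD_array(rows):
--     """ orig/dest pairs to match cell contents.  There's probably a
--           slicker way to do it in Numpy."""
--     arr=[]
--     rwa=[]
--     ca=[]
--     vals = list(range(1, rows+1))
--     for r in range(1,rows+1):
--         rwa.extend([r]*rows)
--         for c in range(1, rows+1):
--             ca.extend([c])
--     return [rwa,ca]
-- ===== SOURCE B (Python) =====
-- def make_OD_array(rows):
--     """ orig/dest pairs to match cell contents.  There's probably a
--           slicker way to do it in Numpy."""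
--     origins = list(range(1, rows + 1))
--     n = len(origins)
--     rwa = [origins[i // n] for i in range(n * n)]
--     ca = [origins[i % n] for i in range(n * n)]
--     return [rwa, ca]
-- ===== Notes on version B (the rewrite author's own statement) =====
-- stated objective: alternative
-- what changed: Builds the value list range(1, rows+1) once and fills each output with a single flat comprehension over the n*n linear index, reading the row as origins[i//n] and the column as origins[i%n], instead of A's two nested loops; the unused vals list is dropped.
import Mathlib
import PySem

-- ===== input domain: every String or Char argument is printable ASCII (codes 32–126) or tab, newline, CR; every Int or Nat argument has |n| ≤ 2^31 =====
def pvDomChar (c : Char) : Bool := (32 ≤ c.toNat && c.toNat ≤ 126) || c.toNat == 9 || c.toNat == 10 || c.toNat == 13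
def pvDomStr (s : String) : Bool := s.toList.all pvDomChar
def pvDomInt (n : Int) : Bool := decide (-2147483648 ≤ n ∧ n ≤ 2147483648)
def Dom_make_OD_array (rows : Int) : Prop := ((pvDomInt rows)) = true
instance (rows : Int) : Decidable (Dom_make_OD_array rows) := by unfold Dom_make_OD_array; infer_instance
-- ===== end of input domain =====

-- B builds the value list once and fills each output with one flat comprehension over the n*n linear index (alternative decomposition, same cost).

-- ===== PORT A =====
def make_OD_array (rows : Int) : List (List Int) :=
  let _arr : List Int := []
  let _vals := PySem.List.pyRange 1 (rows + 1) 1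
  let st := (PySem.List.pyRange 1 (rows + 1) 1).foldl
    (fun (st : List Int × List Int) r =>
      (st.1 ++ PySem.List.pyRepeat [r] rows,
       (PySem.List.pyRange 1 (rows + 1) 1).foldl (fun ca c => ca ++ [c]) st.2))
    ([], [])
  [st.1, st.2]

-- ===== PORT B =====
-- pyGetD is exact here: the indices i//n and i%n always lie in [0, n) on the loop's iterations (Python never raises).
def make_OD_array_alt (rows : Int) : List (List Int) :=
  let origins := PySem.List.pyRange 1 (rows + 1) 1
  let n : Int := origins.length
  let rwa := (PySem.List.pyRange 0 (n * n) 1).map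
    (fun i => PySem.List.pyGetD origins (PySem.Int.floordiv i n) 0)
  let ca := (PySem.List.pyRange 0 (n * n) 1).map
    (fun i => PySem.List.pyGetD origins (PySem.Int.mod i n) 0)
  [rwa, ca]

-- ===== PRECONDITION & SPEC =====
def Spec_make_OD_array (rows : Int) (out : List (List Int)) : Prop := out = make_OD_array_alt rows
instance (rows : Int) (out : List (List Int)) : Decidable (Spec_make_OD_array rows out) := by unfold Spec_make_OD_array; infer_instance

-- ===== CLAIM (what is proved, stated in full; the proofs are below) =====
def Claim_equal_make_OD_array : Prop := ∀ (rows : Int), Dom_make_OD_array rows → Spec_make_OD_array rows (make_OD_array rows)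

-- ===== LEMMAS AND PROOFS =====

-- a pair-of-accumulators fold where each step appends blocks is a pair of flatMaps
theorem pv_foldl_pair_append {α : Type} (f g : α → List Int) (l : List α) :
    ∀ (a b : List Int),
      l.foldl (fun (st : List Int × List Int) x => (st.1 ++ f x, st.2 ++ g x)) (a, b)
        = (a ++ l.flatMap f, b ++ l.flatMap g) := by
  induction l with
  | nil => simp
  | cons x xs ih => intro a b; simp [ih, List.append_assoc]

-- reindexing: a map over range (a*m) split into a blocks of m
theorem pv_range_mul_map {α : Type} (m : Nat) (f : Nat → α) :
    ∀ (a : Nat), (List.range (a * m)).map f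
      = (List.range a).flatMap (fun r => (List.range m).map (fun c => f (r * m + c))) := by
  intro a
  induction a with
  | zero => simp
  | succ a ih =>
    have h : (a + 1) * m = a * m + m := by ring
    rw [h, List.range_add, List.map_append, ih, List.range_succ]
    simp [List.map_map, Function.comp]

theorem make_OD_array_spec : Claim_equal_make_OD_array := by
  intro rows _
  unfold Spec_make_OD_array make_OD_array make_OD_array_alt
  by_cases h : 0 < rows
  · set m : Nat := rows.toNat with hm
    have hrows : rows = (m : Int) := (Int.toNat_of_nonneg h.le).symm
    simp only [PySem.List.foldl_append_singleton]
    rw [pv_foldl_pair_append]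
    simp only [List.nil_append]
    rw [PySem.List.pyRange_one 1 (rows + 1)]
    have hlen : ((rows + 1) - 1).toNat = m := by omega
    rw [hlen]
    have hnl : ((List.range m).map (fun k : Nat => (1 : Int) + k)).length = m := by simp
    rw [hnl]
    have hcast : ((m : Int)) * ((m : Int)) = ((m * m : Nat) : Int) := by push_cast; ring
    rw [hcast, PySem.List.pyRange_one 0 ((m * m : Nat) : Int)]
    rw [show (((m * m : Nat) : Int) - 0).toNat = m * m from by omega]
    simp only [List.map_map, List.flatMap_map, Function.comp_def]
    rw [pv_range_mul_map m _ m, pv_range_mul_map m _ m]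
    congr 1
    · -- row array
      refine List.flatMap_congr ?_
      intro r hr
      have hr' : r < m := List.mem_range.mp hr
      rw [PySem.List.pyRepeat_singleton]
      have hrep : ∀ c ∈ List.range m,
          PySem.List.pyGetD ((List.range m).map (fun k : Nat => (1 : Int) + k))
            (PySem.Int.floordiv (0 + ((r * m + c : Nat) : Int)) (m : Int)) 0
            = (1 : Int) + r := by
        intro c hc
        have hc' : c < m := List.mem_range.mp hc
        rw [zero_add, PySem.Int.floordiv_natCast, PySem.List.pyGetD_natCast]
        have hdiv : (r * m + c) / m = r := by
          rw [Nat.mul_comm r m, Nat.mul_add_div (by omega)]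
          simp [Nat.div_eq_of_lt hc']
        rw [hdiv, List.getD_eq_getElem _ _ (by simpa using hr')]
        simp
      symm
      rw [List.map_congr_left hrep, hrows]
      simp [List.map_const', hm]
      omega
    congr 1
    · -- column array
      refine List.flatMap_congr ?_
      intro r _
      have hrep : ∀ c ∈ List.range m,
          PySem.List.pyGetD ((List.range m).map (fun k : Nat => (1 : Int) + k))
            (PySem.Int.mod (0 + ((r * m + c : Nat) : Int)) (m : Int)) 0
            = (1 : Int) + c := by
        intro c hc
        have hc' : c < m := List.mem_range.mp hc
        rw [zero_add, PySem.Int.mod_natCast, PySem.List.pyGetD_natCast]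
        have hmod : (r * m + c) % m = c := by
          rw [Nat.mul_comm r m, Nat.mul_add_mod]
          exact Nat.mod_eq_of_lt hc'
        rw [hmod, List.getD_eq_getElem _ _ (by simpa using hc')]
        simp
      symm
      rw [List.map_congr_left hrep]
  · -- rows ≤ 0: both loops are empty
    have h1 : rows + 1 ≤ 1 := by omega
    simp [PySem.List.pyRange_one_eq_nil h1]
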